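-- pv_equiv track=rewrite | github.com/yifan19860831-hub/rustchain-bounties | scripts/agent_bounty_hunter.py | payout_signal_from_comments
-- ===== SOURCE A (Python) =====
-- from typing import Any, Dict, List, Optional, Tuple
--
-- def payout_signal_from_comments(comments: List[Dict[str, Any]]) -> str:
--     text = "\n".join((c.get("body", "") or "").lower() for c in comments)
--     if any(k in text for k in ("payout queued", "queued id", "pending id")):
--         return "queued"
--     if any(k in text for k in ("paid", "payout sent", "confirmed payout")):
--         return "paid"
--     if any(k in text for k in ("changes requested", "please update", "partial progress")):
--         return "needs_update"
--     return "none"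
-- ===== SOURCE B (Python) =====
-- from typing import Any, Dict, List
--
-- def payout_signal_from_comments(comments: List[Dict[str, Any]]) -> str:
--     has_queued = has_paid = has_needs = False
--     for c in comments:
--         body = (c.get("body", "") or "").lower()
--         if any(k in body for k in ("payout queued", "queued id", "pending id")):
--             has_queued = True
--         if any(k in body for k in ("paid", "payout sent", "confirmed payout")):
--             has_paid = True
--         if any(k in body for k in ("changes requested", "please update", "partial progress")):
--             has_needs = True
--     if has_queued:
--         return "queued"
--     if has_paid:
--         return "paid"
--     if has_needs:
--         return "needs_update"
--     return "none"
-- ===== Notes on version B (the rewrite author's own statement) =====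
-- stated objective: alternative
-- what changed: Instead of joining all lowercased bodies into one big string and rescanning it three times for the keyword groups, B makes a single pass over the comment list, testing each lowered body against the three keyword groups and maintaining three boolean flags, then returns by the same priority order.
import Mathlib
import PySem

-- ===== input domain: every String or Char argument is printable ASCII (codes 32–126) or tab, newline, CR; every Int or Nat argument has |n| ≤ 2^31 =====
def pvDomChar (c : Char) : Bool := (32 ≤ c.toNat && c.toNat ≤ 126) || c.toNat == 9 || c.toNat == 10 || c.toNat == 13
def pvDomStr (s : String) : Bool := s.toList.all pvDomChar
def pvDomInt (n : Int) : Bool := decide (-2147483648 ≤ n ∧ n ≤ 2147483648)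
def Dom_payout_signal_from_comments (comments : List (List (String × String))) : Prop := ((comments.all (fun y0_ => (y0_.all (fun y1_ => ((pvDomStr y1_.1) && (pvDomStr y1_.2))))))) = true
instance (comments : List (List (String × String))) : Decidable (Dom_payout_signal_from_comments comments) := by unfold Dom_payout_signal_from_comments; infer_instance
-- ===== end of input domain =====

-- B replaces A's join-all-bodies-then-rescan-three-times strategy by a single pass over the
-- comments maintaining three boolean match flags (objective: alternative decomposition, same cost).

-- ===== PORT A =====
-- shared per-comment expression of BOTH Pythons: (c.get("body", "") or "").lower(), as a List Char
def pvLowerBody (c : List (String × String)) : List Char :=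
  let b := (PySem.Dict.mk c).getD "body" ""
  PySem.Chars.lower (if b = "" then "" else b).toList

def payout_signal_from_comments (comments : List (List (String × String))) : String :=
  let text := PySem.Chars.join ['\n'] (comments.map pvLowerBody)
  if ["payout queued", "queued id", "pending id"].any (fun k => PySem.Chars.isIn k.toList text) then "queued"
  else if ["paid", "payout sent", "confirmed payout"].any (fun k => PySem.Chars.isIn k.toList text) then "paid"
  else if ["changes requested", "please update", "partial progress"].any (fun k => PySem.Chars.isIn k.toList text) then "needs_update"
  else "none"

-- ===== PORT B =====
-- one loop step of Source B: lower the body once and or the three group tests into the flags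
def pvStep (st : Bool × Bool × Bool) (c : List (String × String)) : Bool × Bool × Bool :=
  let body := pvLowerBody c
  (st.1 || ["payout queued", "queued id", "pending id"].any (fun k => PySem.Chars.isIn k.toList body),
   st.2.1 || ["paid", "payout sent", "confirmed payout"].any (fun k => PySem.Chars.isIn k.toList body),
   st.2.2 || ["changes requested", "please update", "partial progress"].any (fun k => PySem.Chars.isIn k.toList body))

def payout_signal_from_comments_alt (comments : List (List (String × String))) : String :=
  let st := comments.foldl pvStep (false, false, false)
  if st.1 then "queued"
  else if st.2.1 then "paid"
  else if st.2.2 then "needs_update"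
  else "none"

-- ===== PRECONDITION & SPEC =====
def Spec_payout_signal_from_comments (comments : List (List (String × String))) (out : String) : Prop := out = payout_signal_from_comments_alt comments
instance (comments : List (List (String × String))) (out : String) : Decidable (Spec_payout_signal_from_comments comments out) := by unfold Spec_payout_signal_from_comments; infer_instance

-- ===== CLAIM (what is proved, stated in full; the proofs are below) =====
def Claim_equal_payout_signal_from_comments : Prop := ∀ (comments : List (List (String × String))), Dom_payout_signal_from_comments comments → Spec_payout_signal_from_comments comments (payout_signal_from_comments comments)

-- ===== LEMMAS AND PROOFS =====

-- a c-free list is a prefix of x ++ c :: y iff it is a prefix of x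
lemma pv_prefix_append_cons {α : Type} {c : α} {sub x y : List α} (hc : c ∉ sub) :
    sub <+: x ++ c :: y ↔ sub <+: x := by
  induction sub generalizing x with
  | nil => simp
  | cons s sub ih =>
    cases x with
    | nil =>
      simp only [List.nil_append, List.cons_prefix_cons]
      constructor
      · rintro ⟨rfl, -⟩; exact absurd (List.mem_cons_self) hc
      · rintro h; exact absurd h (by simp)
    | cons a x =>
      simp only [List.cons_append, List.cons_prefix_cons]
      exact and_congr_right fun _ => ih (fun h => hc (List.mem_cons_of_mem _ h))

-- a c-free list is an infix of x ++ c :: y iff it is an infix of x or of y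
lemma pv_infix_append_cons {α : Type} {c : α} {sub x y : List α} (hc : c ∉ sub) :
    sub <:+: x ++ c :: y ↔ sub <:+: x ∨ sub <:+: y := by
  induction x with
  | nil =>
    simp only [List.nil_append, List.infix_cons_iff]
    rw [show (c :: y : List α) = [] ++ c :: y from rfl, pv_prefix_append_cons hc]
    simp [List.prefix_nil, List.infix_nil]
  | cons a x ih =>
    rw [List.cons_append, List.infix_cons_iff, ih,
        show (a :: (x ++ c :: y) : List α) = (a :: x) ++ c :: y from rfl,
        pv_prefix_append_cons hc, List.infix_cons_iff]
    tauto

-- a nonempty c-free keyword occurs in the c-join of the bodies iff it occurs in some body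
lemma pv_isIn_join {c : Char} {sub : List Char} (hc : c ∉ sub) (hne : sub ≠ [])
    (bodies : List (List Char)) :
    PySem.Chars.isIn sub (PySem.Chars.join [c] bodies) = bodies.any (fun b => PySem.Chars.isIn sub b) := by
  induction bodies with
  | nil =>
    rw [PySem.Chars.join_nil]
    simp only [List.any_nil]
    rw [Bool.eq_false_iff, Ne, PySem.Chars.isIn_iff_infix, List.infix_nil]
    exact hne
  | cons b rest ih =>
    cases rest with
    | nil =>
      rw [PySem.Chars.join_singleton]
      simp
    | cons b' rest' =>
      rw [PySem.Chars.join_cons_cons, List.append_assoc]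
      have : ([c] ++ PySem.Chars.join [c] (b' :: rest') : List Char)
           = c :: PySem.Chars.join [c] (b' :: rest') := rfl
      rw [this]
      simp only [List.any_cons, ← ih]
      rw [Bool.eq_iff_iff]
      simp only [Bool.or_eq_true, PySem.Chars.isIn_iff_infix]
      exact pv_infix_append_cons hc

lemma pv_any_or {α : Type} (l : List α) (f g : α → Bool) :
    l.any (fun x => f x || g x) = (l.any f || l.any g) := by
  induction l with
  | nil => simp
  | cons a l ih =>
    simp only [List.any_cons, ih]
    cases f a <;> cases g a <;> simp

-- the three flags after B's loop are the three "some comment matches the group" tests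
lemma pv_foldl_step (l : List (List (String × String))) (a b c : Bool) :
    l.foldl pvStep (a, b, c) =
      (a || l.any (fun x => ["payout queued", "queued id", "pending id"].any (fun k => PySem.Chars.isIn k.toList (pvLowerBody x))),
       b || l.any (fun x => ["paid", "payout sent", "confirmed payout"].any (fun k => PySem.Chars.isIn k.toList (pvLowerBody x))),
       c || l.any (fun x => ["changes requested", "please update", "partial progress"].any (fun k => PySem.Chars.isIn k.toList (pvLowerBody x)))) := by
  induction l generalizing a b c with
  | nil => simp
  | cons x l ih =>
    simp only [List.foldl_cons, List.any_cons, pvStep, ih]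
    simp [Bool.or_assoc]

-- ===== VERDICT (by name: the statement is the Claim_ definition above) =====
theorem payout_signal_from_comments_spec : Claim_equal_payout_signal_from_comments := by
  intro comments _
  unfold Spec_payout_signal_from_comments payout_signal_from_comments payout_signal_from_comments_alt
  rw [pv_foldl_step]
  simp only [Bool.false_or, List.any_cons, List.any_nil, Bool.or_false]
  rw [pv_isIn_join (by decide) (by decide), pv_isIn_join (by decide) (by decide),
      pv_isIn_join (by decide) (by decide), pv_isIn_join (by decide) (by decide),
      pv_isIn_join (by decide) (by decide), pv_isIn_join (by decide) (by decide),
      pv_isIn_join (by decide) (by decide), pv_isIn_join (by decide) (by decide),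
      pv_isIn_join (by decide) (by decide)]
  simp only [← pv_any_or, List.any_map, Function.comp_def]
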